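/- GENERATED by mk_final_copies.py from the proof of the farm's unit `codebook_decode_start` (farm:codebook_decode_start.1: Proof.lean) as the
   re-elaboration sweep compiled it — do not edit. -/
import Asan.CheckWalk
import Vorbis.Spec.ReaderLemmas
import Vorbis.Spec.Units.codebook_decode_start

open X86 X86.User Asan Vorbis Vorbis.Spec

set_option maxRecDepth 4000
set_option maxHeartbeats 4000000

/-
  `codebook_decode_start` (79 instructions, no loop, four calls, nine check sites), proved in FOUR STAGES that are chained by
  `ReachVia.trans` in the theorem at the end — the function has 17 paths, and every stage ends in an assertion about a JOIN:

      stage_entry   entry        → AtDecode (0x10e35a, the body of DECODE_VQ) ∨ AtTail (0x10e44f, `lookup_type = 0`: error, z = −1)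
      stage_body    AtDecode     → AtTail (z ≥ 0) ∨ AtEop (0x10e418, z = −1)          fast path, or codebook_decode_scalar_raw
      stage_eop     AtEop        → AtTail                                              the bytes_in_seg / last_seg test, error
      stage_tail    AtTail       → Returned                                            eax := r13d, five pops, ret

  `Carried` is what every assertion shares (the form of `Vorbis.Spec.Mid`, for five pushes, + the reader's post since the entry).
  A stage is a segment proof: `e` is the entry state, `v` the state at the join; the walk starts at `v` with the carried facts
  under names that do NOT begin with `w_` (the walker clears `w_…` hypotheses of the state it leaves).
  Before the stages: pure lemmas — where the struct at `c` is, the bit-level forms of the `int16` table entry and of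
  `valid_bits -= len`, `Bits` / μ through the four stores of the fast path, `BookPre` carried to the call of scalar_raw.
-/

namespace Vorbis.Spec.codebook_decode_start

/-- 0x10e35a (`lea rdi, [rbx+0x6e4]`): the body of DECODE_VQ, the join of the arm through `prep_huffman` and the arm around it.
(No label of Vorbis/Labels.lean names this address: it is not a cut point of the contract.) -/
abbrev bodyAt : Word := Vorbis.L.codebook_decode_start.entry + 0x3a

/-- 0x10e418 (`lea rdi, [rbx+0x6d4]`): the `if (!f->bytes_in_seg)` test of the end-of-packet arm (`z < 0`). -/
abbrev eopAt : Word := Vorbis.L.codebook_decode_start.entry + 0xf8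

/-- **What holds at every join point of `codebook_decode_start`** entered at `e` with return address `ret`, at the state `v`:
the entry facts and the precondition (about `e`); five registers pushed (r14 r13 r12 rbp rbx), `rsp = e.rsp − 40`, the return
address and the five saved registers still in their slots, r15 never written; rbx = `f`; the memory changed only inside the
contract's footprint (written out: the tactics need a literal list); the text unchanged, DF = 0 and the MXCSR masks, no shadow
byte written; `Bits f` in the current memory and μ not increased (`reader`). -/
structure Carried (others : List Obj) (frames : List (Nat × FrameLayout)) (Blk : Block → Prop) (len : Nat) (u₀ : State)
    (ret : Word) (e v : State) : Prop where
  entry : AtEntry (conv u₀) Vorbis.L.codebook_decode_start.entry (codebook_decode_start.spec others frames Blk len).frame ret e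
  pre : BookPre others frames Blk len e
  rsp : v.reg .rsp = e.reg .rsp - 40
  rbx : v.reg .rbx = e.reg .rdi
  r15 : v.reg .r15 = e.reg .r15
  ra : UInt64.ofNat (v.mem.readLE (e.reg .rsp) 8) = ret
  s14 : UInt64.ofNat (v.mem.readLE (e.reg .rsp - 8) 8) = e.reg .r14
  s13 : UInt64.ofNat (v.mem.readLE (e.reg .rsp - 16) 8) = e.reg .r13
  s12 : UInt64.ofNat (v.mem.readLE (e.reg .rsp - 24) 8) = e.reg .r12
  sbp : UInt64.ofNat (v.mem.readLE (e.reg .rsp - 32) 8) = e.reg .rbp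
  sbx : UInt64.ofNat (v.mem.readLE (e.reg .rsp - 40) 8) = e.reg .rbx
  same : Mem.SameExcept
    [⟨(e.reg .rsp).toNat - 432, (e.reg .rsp).toNat⟩,
     ⟨(e.reg .rdi).toNat + 48, (e.reg .rdi).toNat + 56⟩, ⟨(e.reg .rdi).toNat + 84, (e.reg .rdi).toNat + 96⟩,
     ⟨(e.reg .rdi).toNat + 136, (e.reg .rdi).toNat + 144⟩, ⟨(e.reg .rdi).toNat + 1484, (e.reg .rdi).toNat + 1749⟩,
     ⟨(e.reg .rdi).toNat + 1752, (e.reg .rdi).toNat + 1784⟩] e.mem v.mem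
  code : CodeOK u₀ v.mem
  inv : abiInv v
  untouched : ShadowUntouched e.mem v.mem
  reader : ReaderPost Blk len e.mem v.mem (e.reg .rdi).toNat

/-- **0x10e35a, the body of DECODE_VQ**: `Carried`, rbp = `c`, and `c->lookup_type ≠ 0` (the `je` at 0x10e33b was not taken). -/
structure AtDecode (others : List Obj) (frames : List (Nat × FrameLayout)) (Blk : Block → Prop) (len : Nat) (u₀ : State)
    (ret : Word) (e v : State) : Prop where
  rip : v.rip = bodyAt
  mid : Carried others frames Blk len u₀ ret e v
  rbp : v.reg .rbp = e.reg .rsi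
  typ : Codebook.lookup_type e.mem (e.reg .rsi).toNat ≠ 0

/-- **0x10e418, the end-of-packet arm**: `Carried` and r13d = `z` = −1. -/
structure AtEop (others : List Obj) (frames : List (Nat × FrameLayout)) (Blk : Block → Prop) (len : Nat) (u₀ : State)
    (ret : Word) (e v : State) : Prop where
  rip : v.rip = eopAt
  mid : Carried others frames Blk len u₀ ret e v
  z : (v.reg .r13).toNat % 2 ^ 32 = 0xFFFFFFFF

/-- **0x10e44f (`cut3`), the exit join** (`mov eax, r13d`, five pops, `ret`): `Carried` and r13d = `z`, the result: −1, or an index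
below `N(c)` and then `lookup_type = 2`. -/
structure AtTail (others : List Obj) (frames : List (Nat × FrameLayout)) (Blk : Block → Prop) (len : Nat) (u₀ : State)
    (ret : Word) (e v : State) : Prop where
  rip : v.rip = Vorbis.L.codebook_decode_start.cut3
  mid : Carried others frames Blk len u₀ ret e v
  result : argInt (v.reg .r13) = -1 ∨
    (0 ≤ argInt (v.reg .r13) ∧ argInt (v.reg .r13) < Codebook.N e.mem (e.reg .rsi).toNat ∧
      Codebook.lookup_type e.mem (e.reg .rsi).toNat = 2)

/-- **Where the struct at `c` is**, as one arithmetic fact for `u_omega`: above the text, inside the data space, off this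
function's stack (what reading a field of `*c` through the pushes needs). -/
theorem book_where {others : List Obj} {frames : List (Nat × FrameLayout)} {Blk : Block → Prop} {len : Nat} {e : State}
    (hpre : BookPre others frames Blk len e) (htop : 0x700000 < (e.reg .rsp).toNat + 8) :
    0x119d40 ≤ (e.reg .rsi).toNat ∧ (e.reg .rsi).toNat + 2120 ≤ 0xC00000 ∧
      ((e.reg .rsp).toNat + 8 ≤ (e.reg .rsi).toNat ∨ (e.reg .rsi).toNat + 2120 ≤ 0x700000 ∨
        0x800000 ≤ (e.reg .rsi).toNat) := by
  obtain ⟨B, hB, hin⟩ := hpre.book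
  have hs : Site (Live (stackObjs frames ++ others)) (e.reg .rsi).toNat 2120 :=
    Codebook.site_field hpre.reader.env.live hB hin 0 2120 (by simp only [voff]; omega) (by omega) rfl
  have hw := site_where hpre.reader.shadow.inv hpre.reader.shadow.offText htop hs
  have e1 : Vorbis.L.textHi = 0x119d40 := rfl
  omega

/-- The 16-bit round trip of `movzx r12d, word ; movsx r13d, r12w`. -/
theorem low16_zext (y : BitVec 16) : BitVec.setWidth 16 (BitVec.zeroExtend 32 y) = y := by
  bv_decide

/-- The sign of the 32-bit sign extension of a 16-bit value is its own. -/
theorem msb_sext32 (y : BitVec 16) : (BitVec.signExtend 32 y).msb = y.msb := by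
  bv_decide

/-- A non-negative 16-bit value: sign extension is zero extension (64 bits). -/
theorem sext64_nonneg (y : BitVec 16) (h : y.msb = false) : BitVec.signExtend 64 y = BitVec.zeroExtend 64 y := by
  bv_decide

/-- A non-negative 16-bit value: sign extension is zero extension (32 bits). -/
theorem sext32_nonneg (y : BitVec 16) (h : y.msb = false) : BitVec.signExtend 32 y = BitVec.zeroExtend 32 y := by
  bv_decide

/-- **The entry `fast_huffman[k]` as the machine forms it** (`movzx r12d, word [..] ; movsx r13d, r12w ; test r13d, r13d ; js`,
then `movsx r12, r12w`): `H` is the 16-bit load. Sign bit clear: the entry is `H < 32768`, both sign extensions are `H`.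
Sign bit set: the entry is negative, and r13d is its two's complement. -/
theorem fast_entry (H : Nat) (hH : H < 65536) :
    ((BitVec.signExtend 32 (BitVec.setWidth 16 (BitVec.zeroExtend 32 (BitVec.ofNat 16 H)))).msb = false →
      H < 32768 ∧ sint16 H = (H : Int) ∧
      Word.ofBV (BitVec.signExtend 64 (BitVec.setWidth 16 (BitVec.zeroExtend 32 (BitVec.ofNat 16 H)))) = addr H ∧
      Word.ofBV (BitVec.signExtend 32 (BitVec.setWidth 16 (BitVec.zeroExtend 32 (BitVec.ofNat 16 H)))) = addr H) ∧
    ((BitVec.signExtend 32 (BitVec.setWidth 16 (BitVec.zeroExtend 32 (BitVec.ofNat 16 H)))).msb = true →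
      32768 ≤ H) := by
  rw [low16_zext, msb_sext32]
  have hy : (BitVec.ofNat 16 H).toNat = H := by
    rw [BitVec.toNat_ofNat]
    omega
  have hm : (BitVec.ofNat 16 H).msb = decide (32768 ≤ H) := by
    rw [BitVec.msb_eq_decide, hy]
  constructor
  · intro h
    rw [hm] at h
    have hlt : H < 32768 := by
      simpa using h
    have hm' : (BitVec.ofNat 16 H).msb = false := by
      rw [hm]
      simpa using hlt
    refine ⟨hlt, ?_, ?_, ?_⟩
    · unfold sint16
      rw [if_pos hlt]
    · rw [sext64_nonneg _ hm', ofBV_eq_addr _ (Nat.le_refl _), BitVec.toNat_setWidth, hy]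
      congr 1
      omega
    · rw [sext32_nonneg _ hm', ofBV_eq_addr _ (by decide), BitVec.toNat_setWidth, hy]
      congr 1
      omega
  · intro h
    rw [hm] at h
    simpa using h


/-- **This function's footprint misses the struct at `c`**: its stack (`book_where`) and the reader's windows of `*f`
(`BookApart.book`). The `hd1` of `BookPre.carry` / `CodebookOK.frame_sameExcept`. -/
theorem foot_off_book {others : List Obj} {frames : List (Nat × FrameLayout)} {Blk : Block → Prop} {len : Nat} {e : State}
    (hpre : BookPre others frames Blk len e) (hroom : 0x700000 + 432 ≤ (e.reg .rsp).toNat) :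
    ∀ w, w ∈
      [(⟨(e.reg .rsp).toNat - 432, (e.reg .rsp).toNat⟩ : Span),
       ⟨(e.reg .rdi).toNat + 48, (e.reg .rdi).toNat + 56⟩, ⟨(e.reg .rdi).toNat + 84, (e.reg .rdi).toNat + 96⟩,
       ⟨(e.reg .rdi).toNat + 136, (e.reg .rdi).toNat + 144⟩, ⟨(e.reg .rdi).toNat + 1484, (e.reg .rdi).toNat + 1749⟩,
       ⟨(e.reg .rdi).toNat + 1752, (e.reg .rdi).toNat + 1784⟩] →
      (e.reg .rsi).toNat + Off.sizeof.Codebook ≤ w.lo ∨ w.hi ≤ (e.reg .rsi).toNat := by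
  have hcw := book_where hpre (by omega)
  have hsp := hpre.reader.shadow.rsp
  have hab := hpre.apart.book
  simp only [vblock, voff] at hab
  simp only [List.forall_mem_cons, List.not_mem_nil, false_imp_iff, implies_true, and_true, voff]
  omega

/-- **This function's footprint misses the `sorted_values` block** (K4's block is allocated: `blk_where`; `BookApart.sv`). The
`hd2` of `BookPre.carry` / `CodebookOK.frame_sameExcept`. -/
theorem foot_off_sv {others : List Obj} {frames : List (Nat × FrameLayout)} {Blk : Block → Prop} {len : Nat} {e : State}
    (hpre : BookPre others frames Blk len e) (hroom : 0x700000 + 432 ≤ (e.reg .rsp).toNat) :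
    1 ≤ Codebook.sorted_entries e.mem (e.reg .rsi).toNat → ∀ w, w ∈
      [(⟨(e.reg .rsp).toNat - 432, (e.reg .rsp).toNat⟩ : Span),
       ⟨(e.reg .rdi).toNat + 48, (e.reg .rdi).toNat + 56⟩, ⟨(e.reg .rdi).toNat + 84, (e.reg .rdi).toNat + 96⟩,
       ⟨(e.reg .rdi).toNat + 136, (e.reg .rdi).toNat + 144⟩, ⟨(e.reg .rdi).toNat + 1484, (e.reg .rdi).toNat + 1749⟩,
       ⟨(e.reg .rdi).toNat + 1752, (e.reg .rdi).toNat + 1784⟩] →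
      (Codebook.svBlock e.mem (e.reg .rsi).toNat).base + (Codebook.svBlock e.mem (e.reg .rsi).toNat).size ≤ w.lo ∨
        w.hi ≤ (Codebook.svBlock e.mem (e.reg .rsi).toNat).base := by
  intro hse
  have hsp := hpre.reader.shadow.rsp
  have hsv := hpre.apart.sv hse
  have hw := blk_where hpre.reader.env.live hpre.reader.shadow.inv hpre.reader.shadow.offText (by omega)
    (hpre.cb.K4.sv hse) (by
      show 1 ≤ 4 * ((Codebook.sorted_entries e.mem (e.reg .rsi).toNat).toNat + 1)
      omega)
  simp only [vblock, voff] at hsv hw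
  simp only [List.forall_mem_cons, List.not_mem_nil, false_imp_iff, implies_true, and_true]
  omega

/-- **The book in the current memory**: a memory that differs from the entry memory only inside this function's footprint (its
stack, the reader's windows of `*f`) has the same fields of `*c`, `CodebookOK c` and `BookApart`. -/
theorem book_now {others : List Obj} {frames : List (Nat × FrameLayout)} {Blk : Block → Prop} {len : Nat} {e : State}
    {m : Mem} (hpre : BookPre others frames Blk len e) (hroom : 0x700000 + 432 ≤ (e.reg .rsp).toNat)
    (hs : Mem.SameExcept
      [(⟨(e.reg .rsp).toNat - 432, (e.reg .rsp).toNat⟩ : Span),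
       ⟨(e.reg .rdi).toNat + 48, (e.reg .rdi).toNat + 56⟩, ⟨(e.reg .rdi).toNat + 84, (e.reg .rdi).toNat + 96⟩,
       ⟨(e.reg .rdi).toNat + 136, (e.reg .rdi).toNat + 144⟩, ⟨(e.reg .rdi).toNat + 1484, (e.reg .rdi).toNat + 1749⟩,
       ⟨(e.reg .rdi).toNat + 1752, (e.reg .rdi).toNat + 1784⟩] e.mem m) :
    CodebookOK Blk m (e.reg .rsi).toNat ∧ BookApart m (e.reg .rdi).toNat (e.reg .rsi).toNat ∧
      Codebook.SameFields e.mem m (e.reg .rsi).toNat := by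
  obtain ⟨B, hB, hin⟩ := hpre.book
  have hd1 := foot_off_book hpre hroom
  have hd2 := foot_off_sv hpre hroom
  have hkept : (Codebook.block (e.reg .rsi).toNat).Kept e.mem m :=
    Block.Kept.of_sameExcept hs hd1 (Codebook.block_no_wrap hpre.ok hB hin)
  exact ⟨hpre.cb.frame_sameExcept hpre.ok hB hin hs hd1 hd2, hpre.apart.frame (Codebook.SameFields.of_kept hkept),
    Codebook.SameFields.of_kept hkept⟩

/-- **`BookPre` again at the call of `codebook_decode_scalar_raw`**: the same `f` and `c`, the shadow clause, `Bits f` in the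
current memory, and a memory that differs from the entry memory only inside this function's footprint (`BookPre.carry`). -/
theorem book_carry {others : List Obj} {frames : List (Nat × FrameLayout)} {Blk : Block → Prop} {len : Nat} {e s : State}
    (hpre : BookPre others frames Blk len e) (hroom : 0x700000 + 432 ≤ (e.reg .rsp).toNat)
    (hsh : ShadowPre others frames s) (hrdi : s.reg .rdi = e.reg .rdi) (hrsi : s.reg .rsi = e.reg .rsi)
    (hb : Bits Blk len s.mem (e.reg .rdi).toNat)
    (hs : Mem.SameExcept
      [(⟨(e.reg .rsp).toNat - 432, (e.reg .rsp).toNat⟩ : Span),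
       ⟨(e.reg .rdi).toNat + 48, (e.reg .rdi).toNat + 56⟩, ⟨(e.reg .rdi).toNat + 84, (e.reg .rdi).toNat + 96⟩,
       ⟨(e.reg .rdi).toNat + 136, (e.reg .rdi).toNat + 144⟩, ⟨(e.reg .rdi).toNat + 1484, (e.reg .rdi).toNat + 1749⟩,
       ⟨(e.reg .rdi).toNat + 1752, (e.reg .rdi).toNat + 1784⟩] e.mem s.mem) :
    BookPre others frames Blk len s :=
  hpre.carry hsh hrdi hrsi hb hs (foot_off_book hpre hroom) (foot_off_sv hpre hroom)

/-- **`valid_bits -= len` did not go negative** (`sub eax, ebp ; js`, sign flag clear): with `valid_bits ∈ [−1, 32]` (V1) and a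
length byte, the stored difference is in `[0, 32]`: V1 again. A closed bit-vector fact. -/
theorem vb_sub_ok (M : BitVec 32) (L : BitVec 8) (h1 : (4294967295#32).sle M = true) (h2 : M.sle 32#32 = true)
    (hs : (M - BitVec.zeroExtend 32 (BitVec.setWidth 8 (BitVec.zeroExtend 32 L))).msb = false) :
    (4294967295#32).sle (M - BitVec.zeroExtend 32 (BitVec.setWidth 8 (BitVec.zeroExtend 32 L))) = true ∧
      (M - BitVec.zeroExtend 32 (BitVec.setWidth 8 (BitVec.zeroExtend 32 L))).sle 32#32 = true := by
  bv_decide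

/-- The signed form of `vb_sub_ok`, as `Bits.store_valid_bits` wants it. -/
theorem vb_sub_V1 (M : BitVec 32) (L : BitVec 8) (hM : -1 ≤ M.toInt ∧ M.toInt ≤ 32)
    (hs : (M - BitVec.zeroExtend 32 (BitVec.setWidth 8 (BitVec.zeroExtend 32 L))).msb = false) :
    -1 ≤ (M - BitVec.zeroExtend 32 (BitVec.setWidth 8 (BitVec.zeroExtend 32 L))).toInt ∧
      (M - BitVec.zeroExtend 32 (BitVec.setWidth 8 (BitVec.zeroExtend 32 L))).toInt ≤ 32 := by
  have e1 : (4294967295#32).toInt = -1 := by decide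
  have e2 : (32#32).toInt = 32 := by decide
  have h1 : (4294967295#32).sle M = true := by
    rw [BitVec.sle_eq_decide, e1]
    exact decide_eq_true hM.1
  have h2 : M.sle 32#32 = true := by
    rw [BitVec.sle_eq_decide, e2]
    exact decide_eq_true hM.2
  obtain ⟨k1, k2⟩ := vb_sub_ok M L h1 h2 hs
  rw [BitVec.sle_eq_decide, e1] at k1
  rw [BitVec.sle_eq_decide, e2] at k2
  exact ⟨of_decide_eq_true k1, of_decide_eq_true k2⟩

/-- The 32-bit load of `valid_bits`, as a signed bit vector, is the field. -/
theorem vb_toInt (mem : Mem) (f m : Nat) (h : mem.readLE (addr f + 1768) 4 = m) :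
    (BitVec.ofNat 32 m).toInt = stb_vorbis.valid_bits mem f := by
  have hlt : m < 2 ^ 32 := by
    rw [← h]
    exact Mem.readLE_lt' mem _ 4
  rw [BitVec.toInt_eq_toNat_cond, BitVec.toNat_ofNat, Nat.mod_eq_of_lt hlt]
  rcases Vorbis.Spec.PrepHuffman.vb_cases mem f m h with ⟨h1, h2⟩ | ⟨h1, h2, h3⟩
  · rw [h2]
    split <;> omega
  · rw [h3]
    split <;> omega

/-- **The four stores of the fast path of DECODE_VQ** over a memory with the reader's post: the return address of a check, the
new `acc`, another return address, the new `valid_bits` (a value within V1). `Bits f` again, μ unchanged. The addresses are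
spelled as the walker has them (`addr f + 1764`). -/
theorem reader_take {Blk : Block → Prop} {len : Nat} {m0 M : Mem} {f : Nat} (h : ReaderPost Blk len m0 M f) (sp : Word)
    (r1 r2 : Nat) (hlt : sp.toNat + 8 < 2 ^ 64) (hoff : sp.toNat + 8 ≤ f ∨ f + 1808 ≤ sp.toNat) (a : Nat) (x : BitVec 32)
    (hx : -1 ≤ x.toInt ∧ x.toInt ≤ 32) :
    ReaderPost Blk len m0
      ((((M.writeLE sp 8 r1).writeLE (addr f + 1764) 4 a).writeLE sp 8 r2).writeLE (addr f + 1768) 4 x.toNat) f := by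
  have ea : addr f + 1764 = addr (f + 1764) := addr_add_lit f 1764
  have eb : addr f + 1768 = addr (f + 1768) := addr_add_lit f 1768
  rw [ea, eb]
  have k1 := Vorbis.Spec.BitReader.stack_store h.bits sp r1 hlt hoff
  have k2 := Vorbis.Spec.BitReader.acc_store k1.1 a
  have k3 := Vorbis.Spec.BitReader.stack_store k2.1 sp r2 hlt hoff
  have k4 := Vorbis.Spec.BitReader.vb_store k3.1 x hx
  refine ⟨k4.1, ?_⟩
  rw [k4.2.1, k3.2.1, k2.2.1, k1.2.1]
  exact h.mu_le


/-- **`mov r13d, eax ; test r13d, r13d ; jns`** on a callee's `int` result `z`: the copy is the same `int`; sign bit clear: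
`z ≥ 0`; sign bit set: `z < 0`, and if `z = −1` the low half is `FFFFFFFFH`. -/
theorem result_sign (z : Word) :
    argInt (Word.ofBV (Word.part .w32 z)) = argInt z ∧
    ((Word.part .w32 z).msb = false → 0 ≤ argInt z) ∧
    ((Word.part .w32 z).msb = true → argInt z < 0) ∧
    (argInt z = -1 → (Word.ofBV (Word.part .w32 z)).toNat % 2 ^ 32 = 0xFFFFFFFF) := by
  have e1 : (Word.ofBV (Word.part .w32 z)).toNat % 2 ^ 32 = z.toNat % 2 ^ 32 := by
    rw [Vorbis.toNat_ofBV32, Vorbis.toNat_part32, Nat.mod_mod]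
  have hm : (Word.part .w32 z).msb = decide (2 ^ 31 ≤ z.toNat % 2 ^ 32) := by
    rw [BitVec.msb_eq_decide, Vorbis.toNat_part32]
    rfl
  have hlt : z.toNat % 2 ^ 32 < 2 ^ 32 := Nat.mod_lt _ (by decide)
  have hc := sint32_cases (z.toNat % 2 ^ 32)
  refine ⟨?_, ?_, ?_, ?_⟩
  · unfold argInt
    rw [e1]
  · intro h
    rw [hm] at h
    have : ¬ 2 ^ 31 ≤ z.toNat % 2 ^ 32 := by
      simpa using h
    unfold argInt
    omega
  · intro h
    rw [hm] at h
    have : 2 ^ 31 ≤ z.toNat % 2 ^ 32 := by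
      simpa using h
    unfold argInt
    omega
  · intro h
    rw [e1]
    unfold argInt at h
    omega


/-- **The exit** (0x10e44f … 0x10e45a: `mov eax, r13d ; pop rbx ; pop rbp ; pop r12 ; pop r13 ; pop r14 ; ret`): from `AtTail` to
the contract's `Returned`. -/
theorem stage_tail {Lay : Layout} (hLay : Lay.hi = 0x1000000) {μ : Microarch} (hμ : UserX.MicroOK μ) {u₀ : State}
    (hcode : HasCodeNat Lay u₀ Vorbis.L.codebook_decode_start.entry Vorbis.Code.code_codebook_decode_start.nat
      Vorbis.L.codebook_decode_start.size)
    (others : List Obj) (frames : List (Nat × FrameLayout)) (Blk : Block → Prop) (len : Nat) (ret : Word) (e v : State)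
    (hat : AtTail others frames Blk len u₀ ret e v) :
    ReachVia Lay μ WayInv v (Returned (conv u₀) (codebook_decode_start.spec others frames Blk len) e ret) := by
  obtain ⟨hrip, hmid, hresult⟩ := hat
  obtain ⟨he, hpre, hrsp, hrbx, hr15, hra, h14, h13, h12, hbp, hbx, hsame, hcodeok, hinv, hun, hreader⟩ := hmid
  v_entry he
  have hdf : v.flags .df = false := hinv.1
  have hmx : v.mxcsr &&& 0x1F80 = 0x1F80 := hinv.2
  have hsse := Vorbis.sseOK_of_abiInv hinv
  have w_eq : Mem.EqOn Vorbis.L.textLo Vorbis.L.textHi u₀.mem v.mem := hcodeok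
  u_walk hcode [hμ.vendor] span [Vorbis.L.textLo, Vorbis.L.textHi] side (v_side)
  refine ReachVia.done ?_
  v_returned
  · -- the post: the carried facts, and eax = r13d
    have e1 : (s_10e45a.reg .rax).toNat % 2 ^ 32 = (v.reg .r13).toNat % 2 ^ 32 := by
      rw [w_rax, Vorbis.toNat_ofBV32, Vorbis.toNat_part32, Nat.mod_mod]
    refine ⟨?_, ?_, ?_, ?_⟩
    · rw [w_mem]
      exact hun
    · rw [w_mem]
      exact hreader
    · rw [w_rax, Vorbis.toNat_ofBV32, Vorbis.toNat_part32]
      exact Nat.mod_lt _ (by decide)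
    · unfold argInt at hresult ⊢
      rw [e1]
      exact hresult
  · -- the callee-saved registers: five popped back, r15 never written
    intro r hr
    cases r <;> first
      | (exact absurd hr (by decide))
      | (with_reducible assumption)
      | (rw [w_kept .r15 rfl]; exact hr15)


/-- **The end-of-packet arm** (0x10e418 … 0x10e44a; C lines 1813 – 1816), entered with `z = -1`: `error(f,
VORBIS_invalid_stream)` unless `bytes_in_seg = 0 ∧ last_seg ≠ 0` (a clean end of packet); three paths to the exit join. -/
theorem stage_eop {Lay : Layout} (hLay : Lay.hi = 0x1000000) {μ : Microarch} (hμ : UserX.MicroOK μ) {u₀ : State}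
    (hcode : HasCodeNat Lay u₀ Vorbis.L.codebook_decode_start.entry Vorbis.Code.code_codebook_decode_start.nat
      Vorbis.L.codebook_decode_start.size)
    (hl1 : Asan.SmallCheck Lay μ Vorbis.WayInv (Vorbis.CodeOK u₀) [.rax, .rdx] 1 Vorbis.L.__asan_load1_noabort.entry)
    (hl4 : Asan.SmallCheck Lay μ Vorbis.WayInv (Vorbis.CodeOK u₀) [.rax, .rcx, .rdx] 4 Vorbis.L.__asan_load4_noabort.entry)
    (others : List Obj) (frames : List (Nat × FrameLayout)) (Blk : Block → Prop) (len : Nat) (ret : Word) (e v : State)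
    (herr : Calls Lay μ Vorbis.WayInv (Vorbis.conv u₀) Vorbis.L.error.entry (Vorbis.Spec.error.spec others frames))
    (hat : AtEop others frames Blk len u₀ ret e v) :
    ReachVia Lay μ WayInv v (AtTail others frames Blk len u₀ ret e) := by
  obtain ⟨hrip, hmid, hz⟩ := hat
  obtain ⟨he, hpre, hrsp, hrbx, hr15, hra, h14, h13, h12, hbp, hbx, hsame, hcodeok, hinv, hun, hreader⟩ := hmid
  v_entry he
  have hdf : v.flags .df = false := hinv.1
  have hmx : v.mxcsr &&& 0x1F80 = 0x1F80 := hinv.2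
  have hsse := Vorbis.sseOK_of_abiInv hinv
  have hspan : Mem.EqOn Vorbis.L.textLo Vorbis.L.textHi u₀.mem v.mem := hcodeok
  have hsp := hpre.reader.shadow.rsp
  have hwhere := hpre.reader.where_obj
  have hL : BlkLive Blk (Live (stackObjs frames ++ others)) := hpre.reader.env.live
  obtain ⟨f, hf⟩ : ∃ f : Nat, (e.reg .rdi).toNat = f := ⟨_, rfl⟩
  have hr : e.reg .rdi = addr f := eq_addr _ _ hf
  rw [hr] at hrbx
  rw [hf] at hreader hwhere hsame
  have hbits := hreader.bits
  obtain ⟨b, hb⟩ : ∃ b : Nat, v.mem.readLE (addr f + 1748) 1 = b := ⟨_, rfl⟩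
  obtain ⟨l, hl⟩ : ∃ l : Nat, v.mem.readLE (addr f + 1756) 4 = l := ⟨_, rfl⟩
  u_walk hcode [hμ.vendor] until [Vorbis.L.codebook_decode_start.cut3] span [Vorbis.L.textLo, Vorbis.L.textHi] side (v_side)
  case check_10e41f =>
    -- 0x10e41f, load1 [f + 1748] (`f->bytes_in_seg`): a field of `*f`
    have hun' : ShadowUntouched e.mem s_10e41f.mem := by v_untouched
    have hs := hbits.site_field hL 1748 1 (by omega) (by omega) rfl
    exact Vorbis.Spec.check_site hpre.reader.shadow.inv hun' hs (by u_omega)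
  case call_inv => v_inv
  case pre_10e44a =>
    refine ⟨hpre.reader.shadow.call (by v_untouched) (by u_omega) (by u_omega) (by u_omega), ?_⟩
    rw [w_rdi, ← hr]
    exact hpre.reader.env.obj
  case check_10e434 =>
    -- 0x10e434, load4 [f + 1756] (`f->last_seg`): a field of `*f`
    have hun' : ShadowUntouched e.mem s_10e434.mem := by v_untouched
    have hs := hbits.site_field hL 1756 4 (by omega) (by omega) rfl
    exact Vorbis.Spec.check_site hpre.reader.shadow.inv hun' hs (by u_omega)
  case call_inv => v_inv
  case pre_10e44a =>
    refine ⟨hpre.reader.shadow.call (by v_untouched) (by u_omega) (by u_omega) (by u_omega), ?_⟩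
    rw [w_rdi, ← hr]
    exact hpre.reader.env.obj
  · -- `bytes_in_seg ≠ 0`: after `error(f, VORBIS_invalid_stream)`
    have w_eq := Vorbis.conv_code_eqOn w_code
    simp only [X86.User.Spec.footprint, vspec, w_rsp_10e44a, w_rdi_10e44a] at w_same
    have hp0 : UInt64.ofNat (s_10e44a.mem.readLE (e.reg .rsp) 8) = ret := by u_resolve
    have hp1 : UInt64.ofNat (s_10e44a.mem.readLE (e.reg .rsp - 8) 8) = e.reg .r14 := by u_resolve
    have hp2 : UInt64.ofNat (s_10e44a.mem.readLE (e.reg .rsp - 16) 8) = e.reg .r13 := by u_resolve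
    have hp3 : UInt64.ofNat (s_10e44a.mem.readLE (e.reg .rsp - 24) 8) = e.reg .r12 := by u_resolve
    have hp4 : UInt64.ofNat (s_10e44a.mem.readLE (e.reg .rsp - 32) 8) = e.reg .rbp := by u_resolve
    have hp5 : UInt64.ofNat (s_10e44a.mem.readLE (e.reg .rsp - 40) 8) = e.reg .rbx := by u_resolve
    have hs0 : UInt64.ofNat (s_10e44ar.mem.readLE (e.reg .rsp) 8) = ret := by u_frame hp0
    have hs1 : UInt64.ofNat (s_10e44ar.mem.readLE (e.reg .rsp - 8) 8) = e.reg .r14 := by u_frame hp1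
    have hs2 : UInt64.ofNat (s_10e44ar.mem.readLE (e.reg .rsp - 16) 8) = e.reg .r13 := by u_frame hp2
    have hs3 : UInt64.ofNat (s_10e44ar.mem.readLE (e.reg .rsp - 24) 8) = e.reg .r12 := by u_frame hp3
    have hs4 : UInt64.ofNat (s_10e44ar.mem.readLE (e.reg .rsp - 32) 8) = e.reg .rbp := by u_frame hp4
    have hs5 : UInt64.ofNat (s_10e44ar.mem.readLE (e.reg .rsp - 40) 8) = e.reg .rbx := by u_frame hp5
    clear hp0 hp1 hp2 hp3 hp4 hp5
    -- the shadow and the reader's post over the push of the return address and the callee's footprint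
    have hun1 : ShadowUntouched e.mem s_10e44a.mem := by v_untouched
    have hun2 : ShadowUntouched e.mem s_10e44ar.mem := Mem.EqOn.trans hun1 w_post.2.1
    have hrd1 : ReaderPost Blk len e.mem s_10e44a.mem f := by
      rw [w_mem_10e44a]
      exact hreader.trans (Vorbis.Spec.Paging.push_off_obj hbits _ 8 _ (by u_omega) (by u_omega)).1
    have hrd2 : ReaderPost Blk len e.mem s_10e44ar.mem f := by
      refine hrd1.trans (Vorbis.Spec.Paging.reader_of_footprint hrd1.bits w_same ?_).1
      simp only [List.forall_mem_cons, List.not_mem_nil, false_imp_iff, implies_true, and_true]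
      refine ⟨?_, ?_⟩
      · u_omega
      · u_omega
    -- the footprint since the entry: the callee's windows lie inside this function's
    rw [w_mem_10e44a] at w_same
    have hsame2 : Mem.SameExcept
        [⟨(e.reg .rsp).toNat - 432, (e.reg .rsp).toNat⟩,
         ⟨f + 48, f + 56⟩, ⟨f + 84, f + 96⟩, ⟨f + 136, f + 144⟩, ⟨f + 1484, f + 1749⟩, ⟨f + 1752, f + 1784⟩]
        e.mem s_10e44ar.mem := by
      refine Vorbis.Spec.Reader.sameExcept_through_callee ?_ w_same ?_
      · u_same
      · simp only [List.forall_mem_cons, List.not_mem_nil, false_imp_iff, implies_true, and_true, X86.User.inSpans_cons,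
          X86.User.inSpans_nil, or_false]
        repeat' apply And.intro
        all_goals u_omega
    refine ReachVia.done ⟨w_rip, ⟨he, hpre, w_rsp, ?_, ?_, hs0, hs1, hs2, hs3, hs4, hs5, ?_, w_eq, w_inv, hun2, ?_⟩, ?_⟩
    · rw [w_kept.get .rbx rfl, hrbx, hr]
    · rw [w_kept.get .r15 rfl, hr15]
    · rw [hf]
      exact hsame2
    · rw [hf]
      exact hrd2
    · left
      unfold argInt
      rw [w_kept.get .r13 rfl, hz]
      decide
  · -- `bytes_in_seg = 0`, `last_seg ≠ 0`: a clean end of packet, no error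
    have hs0 : UInt64.ofNat (s_10e440.mem.readLE (e.reg .rsp) 8) = ret := by u_resolve
    have hs1 : UInt64.ofNat (s_10e440.mem.readLE (e.reg .rsp - 8) 8) = e.reg .r14 := by u_resolve
    have hs2 : UInt64.ofNat (s_10e440.mem.readLE (e.reg .rsp - 16) 8) = e.reg .r13 := by u_resolve
    have hs3 : UInt64.ofNat (s_10e440.mem.readLE (e.reg .rsp - 24) 8) = e.reg .r12 := by u_resolve
    have hs4 : UInt64.ofNat (s_10e440.mem.readLE (e.reg .rsp - 32) 8) = e.reg .rbp := by u_resolve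
    have hs5 : UInt64.ofNat (s_10e440.mem.readLE (e.reg .rsp - 40) 8) = e.reg .rbx := by u_resolve
    have hun1 : ShadowUntouched e.mem s_10e440.mem := by v_untouched
    have hrd1 : ReaderPost Blk len e.mem s_10e440.mem f := by
      rw [w_mem]
      exact hreader.trans (Vorbis.Spec.Paging.push_off_obj hbits _ 8 _ (by u_omega) (by u_omega)).1
    have hsame2 : Mem.SameExcept
        [⟨(e.reg .rsp).toNat - 432, (e.reg .rsp).toNat⟩,
         ⟨f + 48, f + 56⟩, ⟨f + 84, f + 96⟩, ⟨f + 136, f + 144⟩, ⟨f + 1484, f + 1749⟩, ⟨f + 1752, f + 1784⟩]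
        e.mem s_10e440.mem := by
      rw [w_mem]
      u_same
    have hinv2 : abiInv s_10e440 := by v_inv
    refine ReachVia.done ⟨w_rip, ⟨he, hpre, w_rsp, ?_, ?_, hs0, hs1, hs2, hs3, hs4, hs5, ?_, w_eq, hinv2, hun1, ?_⟩, ?_⟩
    · rw [w_kept.get .rbx rfl, hrbx, hr]
    · rw [w_kept.get .r15 rfl, hr15]
    · rw [hf]
      exact hsame2
    · rw [hf]
      exact hrd1
    · left
      unfold argInt
      rw [w_kept.get .r13 rfl, hz]
      decide
  · -- `bytes_in_seg = 0`, `last_seg = 0`: after `error(f, VORBIS_invalid_stream)`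
    have w_eq := Vorbis.conv_code_eqOn w_code
    simp only [X86.User.Spec.footprint, vspec, w_rsp_10e44a, w_rdi_10e44a] at w_same
    have hp0 : UInt64.ofNat (s_10e44a.mem.readLE (e.reg .rsp) 8) = ret := by u_resolve
    have hp1 : UInt64.ofNat (s_10e44a.mem.readLE (e.reg .rsp - 8) 8) = e.reg .r14 := by u_resolve
    have hp2 : UInt64.ofNat (s_10e44a.mem.readLE (e.reg .rsp - 16) 8) = e.reg .r13 := by u_resolve
    have hp3 : UInt64.ofNat (s_10e44a.mem.readLE (e.reg .rsp - 24) 8) = e.reg .r12 := by u_resolve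
    have hp4 : UInt64.ofNat (s_10e44a.mem.readLE (e.reg .rsp - 32) 8) = e.reg .rbp := by u_resolve
    have hp5 : UInt64.ofNat (s_10e44a.mem.readLE (e.reg .rsp - 40) 8) = e.reg .rbx := by u_resolve
    have hs0 : UInt64.ofNat (s_10e44ar.mem.readLE (e.reg .rsp) 8) = ret := by u_frame hp0
    have hs1 : UInt64.ofNat (s_10e44ar.mem.readLE (e.reg .rsp - 8) 8) = e.reg .r14 := by u_frame hp1
    have hs2 : UInt64.ofNat (s_10e44ar.mem.readLE (e.reg .rsp - 16) 8) = e.reg .r13 := by u_frame hp2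
    have hs3 : UInt64.ofNat (s_10e44ar.mem.readLE (e.reg .rsp - 24) 8) = e.reg .r12 := by u_frame hp3
    have hs4 : UInt64.ofNat (s_10e44ar.mem.readLE (e.reg .rsp - 32) 8) = e.reg .rbp := by u_frame hp4
    have hs5 : UInt64.ofNat (s_10e44ar.mem.readLE (e.reg .rsp - 40) 8) = e.reg .rbx := by u_frame hp5
    clear hp0 hp1 hp2 hp3 hp4 hp5
    -- the shadow and the reader's post over the push of the return address and the callee's footprint
    have hun1 : ShadowUntouched e.mem s_10e44a.mem := by v_untouched
    have hun2 : ShadowUntouched e.mem s_10e44ar.mem := Mem.EqOn.trans hun1 w_post.2.1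
    have hrd1 : ReaderPost Blk len e.mem s_10e44a.mem f := by
      rw [w_mem_10e44a]
      exact hreader.trans (Vorbis.Spec.Paging.push_off_obj hbits _ 8 _ (by u_omega) (by u_omega)).1
    have hrd2 : ReaderPost Blk len e.mem s_10e44ar.mem f := by
      refine hrd1.trans (Vorbis.Spec.Paging.reader_of_footprint hrd1.bits w_same ?_).1
      simp only [List.forall_mem_cons, List.not_mem_nil, false_imp_iff, implies_true, and_true]
      refine ⟨?_, ?_⟩
      · u_omega
      · u_omega
    -- the footprint since the entry: the callee's windows lie inside this function's
    rw [w_mem_10e44a] at w_same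
    have hsame2 : Mem.SameExcept
        [⟨(e.reg .rsp).toNat - 432, (e.reg .rsp).toNat⟩,
         ⟨f + 48, f + 56⟩, ⟨f + 84, f + 96⟩, ⟨f + 136, f + 144⟩, ⟨f + 1484, f + 1749⟩, ⟨f + 1752, f + 1784⟩]
        e.mem s_10e44ar.mem := by
      refine Vorbis.Spec.Reader.sameExcept_through_callee ?_ w_same ?_
      · u_same
      · simp only [List.forall_mem_cons, List.not_mem_nil, false_imp_iff, implies_true, and_true, X86.User.inSpans_cons,
          X86.User.inSpans_nil, or_false]
        repeat' apply And.intro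
        all_goals u_omega
    refine ReachVia.done ⟨w_rip, ⟨he, hpre, w_rsp, ?_, ?_, hs0, hs1, hs2, hs3, hs4, hs5, ?_, w_eq, w_inv, hun2, ?_⟩, ?_⟩
    · rw [w_kept.get .rbx rfl, hrbx, hr]
    · rw [w_kept.get .r15 rfl, hr15]
    · rw [hf]
      exact hsame2
    · rw [hf]
      exact hrd2
    · left
      unfold argInt
      rw [w_kept.get .r13 rfl, hz]
      decide



/-- **The entry** (0x10e320 … 0x10e354, 0x10e3e6 … 0x10e403; C lines 1803 – 1810): five pushes, the test of `c->lookup_type`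
(type 0: `error(f, VORBIS_invalid_stream)`, `z = -1`, to the exit join), the test `valid_bits ≤ 9` (`prep_huffman(f)`), and on to
the body of DECODE_VQ. -/
theorem stage_entry {Lay : Layout} (hLay : Lay.hi = 0x1000000) {μ : Microarch} (hμ : UserX.MicroOK μ) {u₀ : State}
    (hcode : HasCodeNat Lay u₀ Vorbis.L.codebook_decode_start.entry Vorbis.Code.code_codebook_decode_start.nat
      Vorbis.L.codebook_decode_start.size)
    (hl1 : Asan.SmallCheck Lay μ Vorbis.WayInv (Vorbis.CodeOK u₀) [.rax, .rdx] 1 Vorbis.L.__asan_load1_noabort.entry)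
    (hl4 : Asan.SmallCheck Lay μ Vorbis.WayInv (Vorbis.CodeOK u₀) [.rax, .rcx, .rdx] 4 Vorbis.L.__asan_load4_noabort.entry)
    (others : List Obj) (frames : List (Nat × FrameLayout)) (Blk : Block → Prop) (len : Nat) (ret : Word) (e : State)
    (herr : Calls Lay μ Vorbis.WayInv (Vorbis.conv u₀) Vorbis.L.error.entry (Vorbis.Spec.error.spec others frames))
    (hprep : Calls Lay μ Vorbis.WayInv (Vorbis.conv u₀) Vorbis.L.prep_huffman.entry
      (Vorbis.Spec.prep_huffman.spec others frames Blk len))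
    (he : AtEntry (conv u₀) Vorbis.L.codebook_decode_start.entry (codebook_decode_start.spec others frames Blk len).frame ret e)
    (hpre : BookPre others frames Blk len e) :
    ReachVia Lay μ WayInv e (fun v => AtDecode others frames Blk len u₀ ret e v ∨ AtTail others frames Blk len u₀ ret e v) := by
  have he' := he
  v_entry he
  have hsp := hpre.reader.shadow.rsp
  have hwhere := hpre.reader.where_obj
  have hcw := book_where hpre (by omega)
  have hL : BlkLive Blk (Live (stackObjs frames ++ others)) := hpre.reader.env.live
  obtain ⟨f, hf⟩ : ∃ f : Nat, (e.reg .rdi).toNat = f := ⟨_, rfl⟩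
  have hr : e.reg .rdi = addr f := eq_addr _ _ hf
  obtain ⟨c, hc⟩ : ∃ c : Nat, (e.reg .rsi).toNat = c := ⟨_, rfl⟩
  have hrc : e.reg .rsi = addr c := eq_addr _ _ hc
  have hbits : Bits Blk len e.mem f := hf ▸ hpre.reader.bits
  rw [hf] at hwhere
  rw [hc] at hcw
  have r25 : e.mem.readLE (addr c + 25) 1 = Codebook.lookup_type e.mem c := by
    simp only [vfield, vacc, voff]
  obtain ⟨m, hm⟩ : ∃ m : Nat, e.mem.readLE (addr f + 1768) 4 = m := ⟨_, rfl⟩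
  u_walk hcode [hμ.vendor] until [Vorbis.L.codebook_decode_start.cut3, bodyAt] span [Vorbis.L.textLo, Vorbis.L.textHi] side (v_side)
  case check_10e332 =>
    -- 0x10e332, load1 [c + 25] (`c->lookup_type`): a field of the struct at `c`
    obtain ⟨B, hB, hin⟩ := hpre.book
    rw [hc] at hin
    have hun' : ShadowUntouched e.mem s_10e332.mem := by v_untouched
    have hs := Codebook.site_field hL hB hin 25 1 (by simp only [voff]; omega) (by omega) rfl
    exact Vorbis.Spec.check_site hpre.reader.shadow.inv hun' hs (by u_omega)
  case call_inv => v_inv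
  case pre_10e3ee =>
    refine ⟨hpre.reader.shadow.call (by v_untouched) (by u_omega) (by u_omega) (by u_omega), ?_⟩
    rw [w_rdi, ← hr]
    exact hpre.reader.env.obj
  case check_10e348 =>
    -- 0x10e348, load4 [f + 1768] (`f->valid_bits`): a field of `*f`
    have hun' : ShadowUntouched e.mem s_10e348.mem := by v_untouched
    have hs := hbits.site_field hL 1768 4 (by omega) (by omega) rfl
    exact Vorbis.Spec.check_site hpre.reader.shadow.inv hun' hs (by u_omega)
  case call_inv => v_inv
  case pre_10e3fe =>
    -- prep_huffman's precondition: the reader's, with `Bits f` over the pushes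
    have hun' : ShadowUntouched e.mem s_10e3fe.mem := by v_untouched
    have hrdi : s_10e3fe.reg .rdi = e.reg .rdi := by rw [w_rdi, hr]
    refine hpre.reader.again (hpre.reader.shadow.call hun' (by u_omega) (by u_omega) (by u_omega)) hrdi ?_
    have hsame : Mem.SameExcept [⟨(e.reg .rsp).toNat - 48, (e.reg .rsp).toNat⟩] e.mem s_10e3fe.mem := by
      u_same
    exact (Vorbis.Spec.Reader.reader_of_window hpre.reader.bits hsame (by omega)).1
  · -- `c->lookup_type = 0`: after `error(f, VORBIS_invalid_stream)`; `z = -1`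
    have w_eq := Vorbis.conv_code_eqOn w_code
    have w_df := (show X86.User.abiInv _ from w_inv).1
    have w_mx := (show X86.User.abiInv _ from w_inv).2
    have w_sse := Vorbis.sseOK_of_abiInv w_inv
    simp only [X86.User.Spec.footprint, vspec, w_rsp_10e3ee, w_rdi_10e3ee] at w_same
    have hp0 : UInt64.ofNat (s_10e3ee.mem.readLE (e.reg .rsp) 8) = ret := by u_resolve
    have hp1 : UInt64.ofNat (s_10e3ee.mem.readLE (e.reg .rsp - 8) 8) = e.reg .r14 := by u_resolve
    have hp2 : UInt64.ofNat (s_10e3ee.mem.readLE (e.reg .rsp - 16) 8) = e.reg .r13 := by u_resolve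
    have hp3 : UInt64.ofNat (s_10e3ee.mem.readLE (e.reg .rsp - 24) 8) = e.reg .r12 := by u_resolve
    have hp4 : UInt64.ofNat (s_10e3ee.mem.readLE (e.reg .rsp - 32) 8) = e.reg .rbp := by u_resolve
    have hp5 : UInt64.ofNat (s_10e3ee.mem.readLE (e.reg .rsp - 40) 8) = e.reg .rbx := by u_resolve
    have hs0 : UInt64.ofNat (s_10e3eer.mem.readLE (e.reg .rsp) 8) = ret := by u_frame hp0
    have hs1 : UInt64.ofNat (s_10e3eer.mem.readLE (e.reg .rsp - 8) 8) = e.reg .r14 := by u_frame hp1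
    have hs2 : UInt64.ofNat (s_10e3eer.mem.readLE (e.reg .rsp - 16) 8) = e.reg .r13 := by u_frame hp2
    have hs3 : UInt64.ofNat (s_10e3eer.mem.readLE (e.reg .rsp - 24) 8) = e.reg .r12 := by u_frame hp3
    have hs4 : UInt64.ofNat (s_10e3eer.mem.readLE (e.reg .rsp - 32) 8) = e.reg .rbp := by u_frame hp4
    have hs5 : UInt64.ofNat (s_10e3eer.mem.readLE (e.reg .rsp - 40) 8) = e.reg .rbx := by u_frame hp5
    clear hp0 hp1 hp2 hp3 hp4 hp5
    have hsame1 : Mem.SameExcept [⟨(e.reg .rsp).toNat - 48, (e.reg .rsp).toNat⟩] e.mem s_10e3ee.mem := by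
      u_same
    have hrd1 : ReaderPost Blk len e.mem s_10e3ee.mem f :=
      (Vorbis.Spec.Paging.reader_of_footprint hbits hsame1 (by
        simp only [List.forall_mem_cons, List.not_mem_nil, false_imp_iff, implies_true, and_true]
        omega)).1
    have hun1 : ShadowUntouched e.mem s_10e3ee.mem := by v_untouched
    have hun2 : ShadowUntouched e.mem s_10e3eer.mem := Mem.EqOn.trans hun1 w_post.2.1
    have hrd2 : ReaderPost Blk len e.mem s_10e3eer.mem f := by
      refine hrd1.trans (Vorbis.Spec.Paging.reader_of_footprint hrd1.bits w_same ?_).1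
      simp only [List.forall_mem_cons, List.not_mem_nil, false_imp_iff, implies_true, and_true]
      refine ⟨?_, ?_⟩
      · u_omega
      · u_omega
    rw [w_mem_10e3ee] at w_same
    have hsame2 : Mem.SameExcept
        [⟨(e.reg .rsp).toNat - 432, (e.reg .rsp).toNat⟩,
         ⟨f + 48, f + 56⟩, ⟨f + 84, f + 96⟩, ⟨f + 136, f + 144⟩, ⟨f + 1484, f + 1749⟩, ⟨f + 1752, f + 1784⟩]
        e.mem s_10e3eer.mem := by
      refine Vorbis.Spec.Reader.sameExcept_through_callee ?_ w_same ?_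
      · u_same
      · simp only [List.forall_mem_cons, List.not_mem_nil, false_imp_iff, implies_true, and_true, X86.User.inSpans_cons,
          X86.User.inSpans_nil, or_false]
        repeat' apply And.intro
        all_goals u_omega
    have w_r15 : s_10e3eer.reg .r15 = e.reg .r15 := w_kept.get .r15 rfl
    u_walk hcode [hμ.vendor] until [Vorbis.L.codebook_decode_start.cut3, bodyAt] span [Vorbis.L.textLo, Vorbis.L.textHi] side (v_side)
    -- 0x10e44f: the exit join, with `z = -1`
    have hinv2 : abiInv s_10e3f9 := by v_inv
    refine ReachVia.done (Or.inr ⟨w_rip, ⟨he', hpre, w_rsp, ?_, ?_, ?_, ?_, ?_, ?_, ?_, ?_, ?_, w_eq, hinv2, ?_, ?_⟩, ?_⟩)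
    · rw [w_rbx, hr]
    · exact w_kept.get .r15 rfl
    · rw [w_mem]
      exact hs0
    · rw [w_mem]
      exact hs1
    · rw [w_mem]
      exact hs2
    · rw [w_mem]
      exact hs3
    · rw [w_mem]
      exact hs4
    · rw [w_mem]
      exact hs5
    · rw [w_mem, hf]
      exact hsame2
    · rw [w_mem]
      exact hun2
    · rw [w_mem, hf]
      exact hrd2
    · left
      rw [w_r13]
      decide
  · -- `valid_bits ≤ 9`: after `prep_huffman(f)`; then `jmp` to the body
    have w_eq := Vorbis.conv_code_eqOn w_code
    have w_df := (show X86.User.abiInv _ from w_inv).1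
    have w_mx := (show X86.User.abiInv _ from w_inv).2
    have w_sse := Vorbis.sseOK_of_abiInv w_inv
    simp only [X86.User.Spec.footprint, vspec, w_rsp_10e3fe, w_rdi_10e3fe] at w_same
    have hp0 : UInt64.ofNat (s_10e3fe.mem.readLE (e.reg .rsp) 8) = ret := by u_resolve
    have hp1 : UInt64.ofNat (s_10e3fe.mem.readLE (e.reg .rsp - 8) 8) = e.reg .r14 := by u_resolve
    have hp2 : UInt64.ofNat (s_10e3fe.mem.readLE (e.reg .rsp - 16) 8) = e.reg .r13 := by u_resolve
    have hp3 : UInt64.ofNat (s_10e3fe.mem.readLE (e.reg .rsp - 24) 8) = e.reg .r12 := by u_resolve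
    have hp4 : UInt64.ofNat (s_10e3fe.mem.readLE (e.reg .rsp - 32) 8) = e.reg .rbp := by u_resolve
    have hp5 : UInt64.ofNat (s_10e3fe.mem.readLE (e.reg .rsp - 40) 8) = e.reg .rbx := by u_resolve
    have hs0 : UInt64.ofNat (s_10e3fer.mem.readLE (e.reg .rsp) 8) = ret := by u_frame hp0
    have hs1 : UInt64.ofNat (s_10e3fer.mem.readLE (e.reg .rsp - 8) 8) = e.reg .r14 := by u_frame hp1
    have hs2 : UInt64.ofNat (s_10e3fer.mem.readLE (e.reg .rsp - 16) 8) = e.reg .r13 := by u_frame hp2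
    have hs3 : UInt64.ofNat (s_10e3fer.mem.readLE (e.reg .rsp - 24) 8) = e.reg .r12 := by u_frame hp3
    have hs4 : UInt64.ofNat (s_10e3fer.mem.readLE (e.reg .rsp - 32) 8) = e.reg .rbp := by u_frame hp4
    have hs5 : UInt64.ofNat (s_10e3fer.mem.readLE (e.reg .rsp - 40) 8) = e.reg .rbx := by u_frame hp5
    clear hp0 hp1 hp2 hp3 hp4 hp5
    have hsame1 : Mem.SameExcept [⟨(e.reg .rsp).toNat - 48, (e.reg .rsp).toNat⟩] e.mem s_10e3fe.mem := by
      u_same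
    have hrd1 : ReaderPost Blk len e.mem s_10e3fe.mem f :=
      (Vorbis.Spec.Paging.reader_of_footprint hbits hsame1 (by
        simp only [List.forall_mem_cons, List.not_mem_nil, false_imp_iff, implies_true, and_true]
        omega)).1
    have hun1 : ShadowUntouched e.mem s_10e3fe.mem := by v_untouched
    have hpost : Vorbis.Spec.PrepHuffmanPost Blk len (s_10e3fe.reg .rdi).toNat s_10e3fe s_10e3fer := w_post
    rw [w_rdi_10e3fe, ← hr, hf] at hpost
    have hun2 : ShadowUntouched e.mem s_10e3fer.mem := Mem.EqOn.trans hun1 hpost.untouched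
    have hrd2 : ReaderPost Blk len e.mem s_10e3fer.mem f := hrd1.trans hpost.reader
    rw [w_mem_10e3fe] at w_same
    have hsame2 : Mem.SameExcept
        [⟨(e.reg .rsp).toNat - 432, (e.reg .rsp).toNat⟩,
         ⟨f + 48, f + 56⟩, ⟨f + 84, f + 96⟩, ⟨f + 136, f + 144⟩, ⟨f + 1484, f + 1749⟩, ⟨f + 1752, f + 1784⟩]
        e.mem s_10e3fer.mem := by
      refine Vorbis.Spec.Reader.sameExcept_through_callee ?_ w_same ?_
      · u_same
      · simp only [List.forall_mem_cons, List.not_mem_nil, false_imp_iff, implies_true, and_true, X86.User.inSpans_cons,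
          X86.User.inSpans_nil, or_false]
        repeat' apply And.intro
        all_goals u_omega
    have w_r15 : s_10e3fer.reg .r15 = e.reg .r15 := w_kept.get .r15 rfl
    u_walk hcode [hμ.vendor] until [Vorbis.L.codebook_decode_start.cut3, bodyAt] span [Vorbis.L.textLo, Vorbis.L.textHi] side (v_side)
    have hinv2 : abiInv s_10e403 := by v_inv
    have htyp : Codebook.lookup_type e.mem c ≠ 0 := by
      have := Mem.u8_lt e.mem (c + 25)
      simp only [vacc, voff] at hbr_10e33b ⊢
      omega
    refine ReachVia.done (Or.inl ⟨w_rip, ⟨he', hpre, w_rsp, ?_, ?_, ?_, ?_, ?_, ?_, ?_, ?_, ?_, w_eq, hinv2, ?_, ?_⟩, ?_, ?_⟩)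
    · rw [w_rbx, hr]
    · exact w_kept.get .r15 rfl
    · rw [w_mem]
      exact hs0
    · rw [w_mem]
      exact hs1
    · rw [w_mem]
      exact hs2
    · rw [w_mem]
      exact hs3
    · rw [w_mem]
      exact hs4
    · rw [w_mem]
      exact hs5
    · rw [w_mem, hf]
      exact hsame2
    · rw [w_mem]
      exact hun2
    · rw [w_mem, hf]
      exact hrd2
    · rw [w_rbp, hrc]
    · rw [hc]
      exact htyp
  · -- `valid_bits > 9`: straight to the body
    have hinv2 : abiInv s_10e354 := by v_inv
    have htyp : Codebook.lookup_type e.mem c ≠ 0 := by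
      have := Mem.u8_lt e.mem (c + 25)
      simp only [vacc, voff] at hbr_10e33b ⊢
      omega
    refine ReachVia.done (Or.inl ⟨w_rip, ⟨he', hpre, w_rsp, ?_, ?_, ?_, ?_, ?_, ?_, ?_, ?_, ?_, w_eq, hinv2, ?_, ?_⟩, ?_, ?_⟩)
    · rw [w_rbx, hr]
    · exact w_kept.get .r15 rfl
    · u_resolve
    · u_resolve
    · u_resolve
    · u_resolve
    · u_resolve
    · u_resolve
    · rw [hf]
      u_same
    · v_untouched
    · rw [hf]
      have hsame1 : Mem.SameExcept [⟨(e.reg .rsp).toNat - 48, (e.reg .rsp).toNat⟩] e.mem s_10e354.mem := by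
        u_same
      exact (Vorbis.Spec.Paging.reader_of_footprint hbits hsame1 (by
        simp only [List.forall_mem_cons, List.not_mem_nil, false_imp_iff, implies_true, and_true]
        omega)).1
    · rw [w_rbp, hrc]
    · rw [hc]
      exact htyp

/-- **The body of DECODE_VQ** (0x10e35a … 0x10e3e4, 0x10e408 … 0x10e412, 0x10e45b … 0x10e469; C line 1810): `acc`, the index
`k = acc & 1023`, the entry `fast_huffman[k]`. Negative: `codebook_decode_scalar_raw(f, c)` (`BookPre` again by `book_carry`).
Else the length byte `codeword_lengths[H]` (K5 + K3: `site_lengths_of_fast`), `acc >>= len`, `valid_bits -= len`, and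
`valid_bits := 0 ; z = -1` if that went negative (V1 is restored by the second store: `reader_take` sees the final memory only).
Ends at the exit join (`z ≥ 0`) or at the end-of-packet test (`z = -1`). -/
theorem stage_body {Lay : Layout} (hLay : Lay.hi = 0x1000000) {μ : Microarch} (hμ : UserX.MicroOK μ) {u₀ : State}
    (hcode : HasCodeNat Lay u₀ Vorbis.L.codebook_decode_start.entry Vorbis.Code.code_codebook_decode_start.nat
      Vorbis.L.codebook_decode_start.size)
    (hl1 : Asan.SmallCheck Lay μ Vorbis.WayInv (Vorbis.CodeOK u₀) [.rax, .rdx] 1 Vorbis.L.__asan_load1_noabort.entry)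
    (hl4 : Asan.SmallCheck Lay μ Vorbis.WayInv (Vorbis.CodeOK u₀) [.rax, .rcx, .rdx] 4 Vorbis.L.__asan_load4_noabort.entry)
    (hl2 : Asan.SmallCheck Lay μ Vorbis.WayInv (Vorbis.CodeOK u₀) [.rax, .rcx, .rdx] 2 Vorbis.L.__asan_load2_noabort.entry)
    (hl8 : Asan.SmallCheck Lay μ Vorbis.WayInv (Vorbis.CodeOK u₀) [.rax, .rcx, .rdx] 8 Vorbis.L.__asan_load8_noabort.entry)
    (others : List Obj) (frames : List (Nat × FrameLayout)) (Blk : Block → Prop) (len : Nat) (ret : Word) (e v : State)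
    (hraw : Calls Lay μ Vorbis.WayInv (Vorbis.conv u₀) Vorbis.L.codebook_decode_scalar_raw.entry
      (Vorbis.Spec.codebook_decode_scalar_raw.spec others frames Blk len))
    (hat : AtDecode others frames Blk len u₀ ret e v) :
    ReachVia Lay μ WayInv v (fun w => AtTail others frames Blk len u₀ ret e w ∨ AtEop others frames Blk len u₀ ret e w) := by
  obtain ⟨hrip, hmid, hrbp, htyp⟩ := hat
  obtain ⟨he, hpre, hrsp, hrbx, hr15, hra, h14, h13, h12, hbp, hbx, hsame, hcodeok, hinv, hun, hreader⟩ := hmid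
  v_entry he
  have hdf : v.flags .df = false := hinv.1
  have hmx : v.mxcsr &&& 0x1F80 = 0x1F80 := hinv.2
  have hsse := Vorbis.sseOK_of_abiInv hinv
  have hspan : Mem.EqOn Vorbis.L.textLo Vorbis.L.textHi u₀.mem v.mem := hcodeok
  have hsp := hpre.reader.shadow.rsp
  have hwhere := hpre.reader.where_obj
  have hcw := book_where hpre (by omega)
  have hL : BlkLive Blk (Live (stackObjs frames ++ others)) := hpre.reader.env.live
  obtain ⟨hcb, hap, hsf⟩ := book_now hpre (by omega) hsame
  obtain ⟨B, hB, hin⟩ := hpre.book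
  obtain ⟨f, hf⟩ : ∃ f : Nat, (e.reg .rdi).toNat = f := ⟨_, rfl⟩
  have hr : e.reg .rdi = addr f := eq_addr _ _ hf
  obtain ⟨c, hc⟩ : ∃ c : Nat, (e.reg .rsi).toNat = c := ⟨_, rfl⟩
  have hrc : e.reg .rsi = addr c := eq_addr _ _ hc
  rw [hr] at hrbx
  rw [hrc] at hrbp
  rw [hf] at hreader hwhere hsame hap
  rw [hc] at hcw htyp hcb hap hsf hin
  have hbits := hreader.bits
  -- the loads of the body, named
  obtain ⟨A, hA⟩ : ∃ A : Nat, v.mem.readLE (addr f + 1764) 4 = A := ⟨_, rfl⟩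
  obtain ⟨m, hm⟩ : ∃ m : Nat, v.mem.readLE (addr f + 1768) 4 = m := ⟨_, rfl⟩
  have r8 : v.mem.readLE (addr c + 8) 8 = Codebook.codeword_lengths v.mem c := by
    simp only [vfield, vacc, voff]
  -- the index `k = acc & 1023` as a number
  obtain ⟨k, hk, hK⟩ : ∃ k : Nat, k < 1024 ∧
      Word.ofBV (BitVec.setWidth 64 (BitVec.ofNat 32 A &&& 1023#32)) = addr k := by
    refine ⟨_, ?_, ofBV_eq_addr _ (Nat.le_refl _)⟩
    rw [BitVec.toNat_setWidth, BitVec.toNat_and]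
    have h1 : (BitVec.ofNat 32 A).toNat &&& (1023#32).toNat ≤ (1023#32).toNat := Nat.and_le_right
    have h2 : (1023#32).toNat = 1023 := by decide
    omega
  have hfa : addr c + addr (k + 24) * 2 = addr (c + 48 + 2 * k) := by
    simp only [vfield]
    congr 1
    omega
  have hfaN : (addr c + addr (k + 24) * 2).toNat = c + 48 + 2 * k := by
    rw [hfa]
    exact toNat_addr _ (by omega)
  -- 0x10e35a … 0x10e380: `acc`, the index, the check of `c->fast_huffman[k]`
  u_walk hcode [hμ.vendor] until [Vorbis.L.codebook_decode_start.ret4] span [Vorbis.L.textLo, Vorbis.L.textHi] side (v_side)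
  case check_10e361 =>
    -- 0x10e361, load4 [f + 1764] (`f->acc`): a field of `*f`
    have hun' : ShadowUntouched e.mem s_10e361.mem := by v_untouched
    have hs := hbits.site_field hL 1764 4 (by omega) (by omega) rfl
    exact Vorbis.Spec.check_site hpre.reader.shadow.inv hun' hs (by u_omega)
  case check_10e380 =>
    -- 0x10e380, load2 [c + 48 + 2k] (`c->fast_huffman[acc & 1023]`): inside the struct at `c`
    have hun' : ShadowUntouched e.mem s_10e380.mem := by v_untouched
    have hs : Site (Live (stackObjs frames ++ others)) (c + 48 + 2 * k) 2 :=
      Codebook.site_fast_huffman hL hB hin k hk (by simp only [voff])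
    refine Vorbis.Spec.check_site hpre.reader.shadow.inv hun' hs ?_
    rw [hK]
    simp only [vfield]
    rw [toNat_addr _ (by omega)]
    omega
  rw [hK] at w_r12 w_rdi w_acc_10e380
  simp only [vfield] at w_r12 w_rdi
  have hfaH : Lay.Has (addr c + addr (k + 24) * 2) 2 := by
    simp only [vfield] at w_acc_10e380 ⊢
    exact w_acc_10e380
  obtain ⟨H, hH⟩ : ∃ H : Nat, v.mem.readLE (addr c + addr (k + 24) * 2) 2 = H := ⟨_, rfl⟩
  have hHlt : H < 65536 := by
    rw [← hH]
    exact Mem.readLE_lt' v.mem _ 2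
  have hfh : Codebook.fast_huffman v.mem c k = sint16 H := by
    simp only [vacc, voff]
    unfold Mem.i16 Mem.u16
    rw [← hfa, hH]
  -- 0x10e385 … : the entry; negative: `codebook_decode_scalar_raw(f, c)`; else the check of `c->codeword_lengths`
  u_walk hcode [hμ.vendor] until [Vorbis.L.codebook_decode_start.ret5, Vorbis.L.codebook_decode_start.cut4] span [Vorbis.L.textLo, Vorbis.L.textHi] side (v_side)
  case call_inv => v_inv
  case pre_10e461 =>
    -- `BookPre` again: only a return address was pushed since the body's entry
    have hun' : ShadowUntouched e.mem s_10e461.mem := by v_untouched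
    have hs' : Mem.SameExcept
        [⟨(e.reg .rsp).toNat - 432, (e.reg .rsp).toNat⟩,
         ⟨f + 48, f + 56⟩, ⟨f + 84, f + 96⟩, ⟨f + 136, f + 144⟩, ⟨f + 1484, f + 1749⟩, ⟨f + 1752, f + 1784⟩]
        e.mem s_10e461.mem := by
      rw [w_mem]
      u_same
    have hb' : Bits Blk len s_10e461.mem f := by
      rw [w_mem]
      exact (Vorbis.Spec.Paging.push_off_obj hbits _ 8 _ (by u_omega) (by u_omega)).1.bits
    rw [← hf] at hs' hb'
    exact book_carry hpre (by omega) (hpre.reader.shadow.call hun' (by u_omega) (by u_omega) (by u_omega))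
      (by rw [w_rdi, hr]) (by rw [w_rsi, hrc]) hb' hs'
  case check_10e39c =>
    -- 0x10e39c, load8 [c + 8] (`c->codeword_lengths`): a field of the struct at `c`
    have hun' : ShadowUntouched e.mem s_10e39c.mem := by v_untouched
    have hs := Codebook.site_field hL hB hin 8 8 (by simp only [voff]; omega) (by omega) rfl
    exact Vorbis.Spec.check_site hpre.reader.shadow.inv hun' hs (by u_omega)
  rotate_left
  · -- the fast path: `fast_huffman[k] = H ≥ 0`
    obtain ⟨hH15, hs16, e64, e32⟩ := (fast_entry H hHlt).1 hbr_10e392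
    have hfh0 : 0 ≤ Codebook.fast_huffman v.mem c k := by
      rw [hfh, hs16]
      omega
    have hsL : Site (Live (stackObjs frames ++ others)) (Codebook.codeword_lengths v.mem c + H) 1 := by
      have h0 := hcb.site_lengths_of_fast hL k hk hfh0 rfl
      rw [hfh, hs16] at h0
      exact h0
    have hwL := site_where hpre.reader.shadow.inv hpre.reader.shadow.offText (by omega) hsL
    have hPN : (Word.ofBV (BitVec.signExtend 64 (BitVec.setWidth 16 (BitVec.zeroExtend 32 (BitVec.ofNat 16 H)))) +
        UInt64.ofNat (Codebook.codeword_lengths v.mem c)).toNat = Codebook.codeword_lengths v.mem c + H := by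
      rw [e64, addr_add, toNat_addr _ (by omega)]
      omega
    obtain ⟨LEN, hLEN⟩ : ∃ LEN : Nat, v.mem.readLE
        (Word.ofBV (BitVec.signExtend 64 (BitVec.setWidth 16 (BitVec.zeroExtend 32 (BitVec.ofNat 16 H)))) +
          UInt64.ofNat (Codebook.codeword_lengths v.mem c)) 1 = LEN := ⟨_, rfl⟩
    have hV1 := hbits.V1
    have hmI := vb_toInt v.mem f m hm
    u_walk hcode [hμ.vendor] until [Vorbis.L.codebook_decode_start.cut3, eopAt] span [Vorbis.L.textLo, Vorbis.L.textHi] side (v_side)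
    case check_10e3ac =>
      -- 0x10e3ac, load1 [codeword_lengths + H]: `0 ≤ H < N(c)` (K5), inside the lengths block (K3)
      have hun' : ShadowUntouched e.mem s_10e3ac.mem := by v_untouched
      exact Vorbis.Spec.check_site hpre.reader.shadow.inv hun' hsL hPN
    case check_10e3ca =>
      -- 0x10e3ca, load4 [f + 1768] (`f->valid_bits`): a field of `*f`
      have hun' : ShadowUntouched e.mem s_10e3ca.mem := by v_untouched
      have hs := hbits.site_field hL 1768 4 (by omega) (by omega) rfl
      exact Vorbis.Spec.check_site hpre.reader.shadow.inv hun' hs (by u_omega)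
    · -- `valid_bits` went negative: `valid_bits := 0 ; z = -1`, on to the end-of-packet test
      have hs0 : UInt64.ofNat (s_10e412.mem.readLE (e.reg .rsp) 8) = ret := by u_resolve
      have hs1 : UInt64.ofNat (s_10e412.mem.readLE (e.reg .rsp - 8) 8) = e.reg .r14 := by u_resolve
      have hs2 : UInt64.ofNat (s_10e412.mem.readLE (e.reg .rsp - 16) 8) = e.reg .r13 := by u_resolve
      have hs3 : UInt64.ofNat (s_10e412.mem.readLE (e.reg .rsp - 24) 8) = e.reg .r12 := by u_resolve
      have hs4 : UInt64.ofNat (s_10e412.mem.readLE (e.reg .rsp - 32) 8) = e.reg .rbp := by u_resolve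
      have hs5 : UInt64.ofNat (s_10e412.mem.readLE (e.reg .rsp - 40) 8) = e.reg .rbx := by u_resolve
      have hsame2 : Mem.SameExcept
          [⟨(e.reg .rsp).toNat - 432, (e.reg .rsp).toNat⟩,
           ⟨f + 48, f + 56⟩, ⟨f + 84, f + 96⟩, ⟨f + 136, f + 144⟩, ⟨f + 1484, f + 1749⟩, ⟨f + 1752, f + 1784⟩]
          e.mem s_10e412.mem := by
        rw [w_mem]
        u_same
      have hun2 : ShadowUntouched e.mem s_10e412.mem := by v_untouched
      have hinv2 : abiInv s_10e412 := by v_inv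
      have hrd2 : ReaderPost Blk len e.mem s_10e412.mem f := by
        rw [w_mem]
        exact reader_take hreader _ _ _ (by u_omega) (by u_omega) _ 0#32 (by decide)
      refine ReachVia.done (Or.inr ⟨w_rip, ⟨he, hpre, w_rsp, ?_, ?_, hs0, hs1, hs2, hs3, hs4, hs5, ?_, w_eq, hinv2, hun2, ?_⟩, ?_⟩)
      · rw [w_kept.get .rbx rfl, hrbx, hr]
      · rw [w_kept.get .r15 rfl, hr15]
      · rw [hf]
        exact hsame2
      · rw [hf]
        exact hrd2
      · rw [w_r13]
        decide
    · -- the bits are consumed: `z = H ≥ 0`, to the exit join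
      have hs0 : UInt64.ofNat (s_10e3e2.mem.readLE (e.reg .rsp) 8) = ret := by u_resolve
      have hs1 : UInt64.ofNat (s_10e3e2.mem.readLE (e.reg .rsp - 8) 8) = e.reg .r14 := by u_resolve
      have hs2 : UInt64.ofNat (s_10e3e2.mem.readLE (e.reg .rsp - 16) 8) = e.reg .r13 := by u_resolve
      have hs3 : UInt64.ofNat (s_10e3e2.mem.readLE (e.reg .rsp - 24) 8) = e.reg .r12 := by u_resolve
      have hs4 : UInt64.ofNat (s_10e3e2.mem.readLE (e.reg .rsp - 32) 8) = e.reg .rbp := by u_resolve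
      have hs5 : UInt64.ofNat (s_10e3e2.mem.readLE (e.reg .rsp - 40) 8) = e.reg .rbx := by u_resolve
      have hsame2 : Mem.SameExcept
          [⟨(e.reg .rsp).toNat - 432, (e.reg .rsp).toNat⟩,
           ⟨f + 48, f + 56⟩, ⟨f + 84, f + 96⟩, ⟨f + 136, f + 144⟩, ⟨f + 1484, f + 1749⟩, ⟨f + 1752, f + 1784⟩]
          e.mem s_10e3e2.mem := by
        rw [w_mem]
        u_same
      have hun2 : ShadowUntouched e.mem s_10e3e2.mem := by v_untouched
      have hinv2 : abiInv s_10e3e2 := by v_inv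
      have hrd2 : ReaderPost Blk len e.mem s_10e3e2.mem f := by
        rw [w_mem]
        exact reader_take hreader _ _ _ (by u_omega) (by u_omega) _ _ (vb_sub_V1 _ _ (by rw [hmI]; exact hV1) hbr_10e3dd)
      refine ReachVia.done (Or.inl ⟨w_rip, ⟨he, hpre, w_rsp, ?_, ?_, hs0, hs1, hs2, hs3, hs4, hs5, ?_, w_eq, hinv2, hun2, ?_⟩, ?_⟩)
      · rw [w_kept.get .rbx rfl, hrbx, hr]
      · rw [w_kept.get .r15 rfl, hr15]
      · rw [hf]
        exact hsame2
      · rw [hf]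
        exact hrd2
      · -- the result: an index below `N(c)` (K5), and `lookup_type = 2` (K6, the `je` at 0x10e33b)
        right
        have hz : argInt (s_10e3e2.reg .r13) = (H : Int) := by
          rw [w_r13, e32]
          unfold argInt sint32
          rw [toNat_addr _ (by omega)]
          have e1 : H % 2 ^ 32 = H := Nat.mod_eq_of_lt (by omega)
          rw [e1, if_pos (by omega)]
        have hK5 := hcb.K5 k hk
        rw [hfh, hs16] at hK5
        have hN : Codebook.N v.mem c = Codebook.N e.mem c := hsf.N
        rw [hz, hc, ← hN]
        refine ⟨by omega, by omega, ?_⟩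
        have ht := hpre.cb.K6.type_02
        rw [hc] at ht
        omega
    · -- `z < 0` after `z = H ≥ 0`: impossible
      rw [hbr_10e392] at hbr_10e3e2
      exact absurd hbr_10e3e2 (by decide)
  · -- the slow path: after `codebook_decode_scalar_raw(f, c)`
    have w_eq := Vorbis.conv_code_eqOn w_code
    have w_df := (show X86.User.abiInv _ from w_inv).1
    have w_mx := (show X86.User.abiInv _ from w_inv).2
    have w_sse := Vorbis.sseOK_of_abiInv w_inv
    simp only [X86.User.Spec.footprint, vspec, w_rsp_10e461, w_rdi_10e461] at w_same
    have hp0 : UInt64.ofNat (s_10e461.mem.readLE (e.reg .rsp) 8) = ret := by u_resolve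
    have hp1 : UInt64.ofNat (s_10e461.mem.readLE (e.reg .rsp - 8) 8) = e.reg .r14 := by u_resolve
    have hp2 : UInt64.ofNat (s_10e461.mem.readLE (e.reg .rsp - 16) 8) = e.reg .r13 := by u_resolve
    have hp3 : UInt64.ofNat (s_10e461.mem.readLE (e.reg .rsp - 24) 8) = e.reg .r12 := by u_resolve
    have hp4 : UInt64.ofNat (s_10e461.mem.readLE (e.reg .rsp - 32) 8) = e.reg .rbp := by u_resolve
    have hp5 : UInt64.ofNat (s_10e461.mem.readLE (e.reg .rsp - 40) 8) = e.reg .rbx := by u_resolve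
    have hs0 : UInt64.ofNat (s_10e461r.mem.readLE (e.reg .rsp) 8) = ret := by u_frame hp0
    have hs1 : UInt64.ofNat (s_10e461r.mem.readLE (e.reg .rsp - 8) 8) = e.reg .r14 := by u_frame hp1
    have hs2 : UInt64.ofNat (s_10e461r.mem.readLE (e.reg .rsp - 16) 8) = e.reg .r13 := by u_frame hp2
    have hs3 : UInt64.ofNat (s_10e461r.mem.readLE (e.reg .rsp - 24) 8) = e.reg .r12 := by u_frame hp3
    have hs4 : UInt64.ofNat (s_10e461r.mem.readLE (e.reg .rsp - 32) 8) = e.reg .rbp := by u_frame hp4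
    have hs5 : UInt64.ofNat (s_10e461r.mem.readLE (e.reg .rsp - 40) 8) = e.reg .rbx := by u_frame hp5
    clear hp0 hp1 hp2 hp3 hp4 hp5
    -- the memory at the call: one return address pushed since the body's entry
    have hs' : Mem.SameExcept
        [⟨(e.reg .rsp).toNat - 432, (e.reg .rsp).toNat⟩,
         ⟨f + 48, f + 56⟩, ⟨f + 84, f + 96⟩, ⟨f + 136, f + 144⟩, ⟨f + 1484, f + 1749⟩, ⟨f + 1752, f + 1784⟩]
        e.mem s_10e461.mem := by
      rw [w_mem_10e461]
      u_same
    have hun1 : ShadowUntouched e.mem s_10e461.mem := by v_untouched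
    have hrd1 : ReaderPost Blk len e.mem s_10e461.mem f := by
      rw [w_mem_10e461]
      exact hreader.trans (Vorbis.Spec.Paging.push_off_obj hbits _ 8 _ (by u_omega) (by u_omega)).1
    have hN1 : Codebook.N s_10e461.mem c = Codebook.N e.mem c := by
      have hs'' := hs'
      rw [← hf] at hs''
      have := (book_now hpre (by omega) hs'').2.2.N
      rw [hc] at this
      exact this
    -- the callee's post, over `f` and `c`
    have hpost : Vorbis.Spec.ScalarRawPost Blk len s_10e461 s_10e461r := w_post
    have hrdp := hpost.reader
    have hres := hpost.result
    rw [w_rdi_10e461, ← hr, hf] at hrdp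
    rw [w_rsi_10e461, ← hrc, hc] at hres
    have hun2 : ShadowUntouched e.mem s_10e461r.mem := Mem.EqOn.trans hun1 hpost.untouched
    have hrd2 : ReaderPost Blk len e.mem s_10e461r.mem f := hrd1.trans hrdp
    rw [w_mem_10e461] at w_same
    have hsame2 : Mem.SameExcept
        [⟨(e.reg .rsp).toNat - 432, (e.reg .rsp).toNat⟩,
         ⟨f + 48, f + 56⟩, ⟨f + 84, f + 96⟩, ⟨f + 136, f + 144⟩, ⟨f + 1484, f + 1749⟩, ⟨f + 1752, f + 1784⟩]
        e.mem s_10e461r.mem := by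
      refine Vorbis.Spec.Reader.sameExcept_through_callee ?_ w_same ?_
      · u_same
      · simp only [List.forall_mem_cons, List.not_mem_nil, false_imp_iff, implies_true, and_true, X86.User.inSpans_cons,
          X86.User.inSpans_nil, or_false]
        repeat' apply And.intro
        all_goals u_omega
    obtain ⟨z, w_rax⟩ : ∃ z, s_10e461r.reg .rax = z := ⟨_, rfl⟩
    rw [w_rax] at hres
    u_walk hcode [hμ.vendor] until [Vorbis.L.codebook_decode_start.cut3, eopAt] span [Vorbis.L.textLo, Vorbis.L.textHi] side (v_side)
    · -- `z ≥ 0`: an index below `N(c)`, to the exit join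
      obtain ⟨hz1, hz2, hz3, hz4⟩ := result_sign z
      have hz0 := hz2 hbr_10e3e2
      have hinv2 : abiInv s_10e3e2 := by v_inv
      refine ReachVia.done (Or.inl ⟨w_rip, ⟨he, hpre, w_rsp, ?_, ?_, ?_, ?_, ?_, ?_, ?_, ?_, ?_, w_eq, hinv2, ?_, ?_⟩, ?_⟩)
      · rw [w_kept.get .rbx rfl, hrbx, hr]
      · rw [w_kept.get .r15 rfl, hr15]
      · rw [w_mem]
        exact hs0
      · rw [w_mem]
        exact hs1
      · rw [w_mem]
        exact hs2
      · rw [w_mem]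
        exact hs3
      · rw [w_mem]
        exact hs4
      · rw [w_mem]
        exact hs5
      · rw [w_mem, hf]
        exact hsame2
      · rw [w_mem]
        exact hun2
      · rw [w_mem, hf]
        exact hrd2
      · right
        rw [w_r13, hz1, hc, ← hN1]
        have hlt : argInt z < Codebook.N s_10e461.mem c := by
          rcases hres with h | h
          · omega
          · exact h.2
        refine ⟨hz0, hlt, ?_⟩
        have ht := hpre.cb.K6.type_02
        rw [hc] at ht
        omega
    · -- `z < 0`: `z = -1`, on to the end-of-packet test
      obtain ⟨hz1, hz2, hz3, hz4⟩ := result_sign z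
      have hz0 := hz3 hbr_10e3e2
      have hzm : argInt z = -1 := by
        rcases hres with h | h
        · exact h
        · omega
      have hinv2 : abiInv s_10e3e4 := by v_inv
      refine ReachVia.done (Or.inr ⟨w_rip, ⟨he, hpre, w_rsp, ?_, ?_, ?_, ?_, ?_, ?_, ?_, ?_, ?_, w_eq, hinv2, ?_, ?_⟩, ?_⟩)
      · rw [w_kept.get .rbx rfl, hrbx, hr]
      · rw [w_kept.get .r15 rfl, hr15]
      · rw [w_mem]
        exact hs0
      · rw [w_mem]
        exact hs1
      · rw [w_mem]
        exact hs2
      · rw [w_mem]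
        exact hs3
      · rw [w_mem]
        exact hs4
      · rw [w_mem]
        exact hs5
      · rw [w_mem, hf]
        exact hsame2
      · rw [w_mem]
        exact hun2
      · rw [w_mem, hf]
        exact hrd2
      · rw [w_r13]
        exact hz4 hzm


end Vorbis.Spec.codebook_decode_start

/-- `codebook_decode_start(f, c)` satisfies its contract: the four stages chained (`ReachVia.trans`): entry → body of DECODE_VQ
→ (end-of-packet test →) exit join → `Returned`. -/
theorem Vorbis.Spec.Worked.codebook_decode_start_ok : Vorbis.Spec.codebook_decode_start.Statement := by
  unfold Vorbis.Spec.codebook_decode_start.Statement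
  intro Lay hLay μ hμ u₀ hcode hl1 hl4 hl2 hl8 h_error h_prep h_raw others frames Blk len e ret he hpre
  have herr := h_error others frames
  have hprep := h_prep others frames Blk len
  have hraw := h_raw others frames Blk len
  refine (Vorbis.Spec.codebook_decode_start.stage_entry hLay hμ hcode hl1 hl4 others frames Blk len ret e herr hprep he
    hpre).trans ?_
  intro v hv
  rcases hv with hb | ht
  · -- through the body of DECODE_VQ
    refine (Vorbis.Spec.codebook_decode_start.stage_body hLay hμ hcode hl1 hl4 hl2 hl8 others frames Blk len ret e v hraw
      hb).trans ?_
    intro w hw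
    rcases hw with ht | hp
    · exact Vorbis.Spec.codebook_decode_start.stage_tail hLay hμ hcode others frames Blk len ret e w ht
    · refine (Vorbis.Spec.codebook_decode_start.stage_eop hLay hμ hcode hl1 hl4 others frames Blk len ret e w herr
        hp).trans ?_
      intro x hx
      exact Vorbis.Spec.codebook_decode_start.stage_tail hLay hμ hcode others frames Blk len ret e x hx
  · -- `lookup_type = 0`: straight to the exit join
    exact Vorbis.Spec.codebook_decode_start.stage_tail hLay hμ hcode others frames Blk len ret e v ht
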